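-- pv_equiv track=rewrite | github.com/MolecularOncologyLab/plasmaCHORD | Data_Preprocessing/Validation_Extract_Fragments.py | SNV_search
-- ===== SOURCE A (Python) =====
-- def SNV_search(start_pos, md_tag, variant_pos, ref_allele, alt_allele):
--     """
--     Determines if a read contains a specific variant based on the MD tag and other parameters.
--
--     Parameters:
--     - start_pos: int, starting position of the read in the reference genome.
--     - md_tag: str, MD tag from the BAM file indicating mismatches.
--     - variant_pos: int, position of the variant in the reference genome.
--     - ref_allele: str, reference allele at the variant position.
--     - alt_allele: str, alternative allele at the variant position.
--
--     Returns:
--     - True if the read contains the variant, False otherwise.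
--     """
--     current_pos = start_pos
--     mismatches = []  # List to store positions of mismatches
--
--     # Process MD tag
--     md_parts = md_tag.replace('MD:Z:', '').split('^')  # Remove MD:Z: and split deletions
--     for part in md_parts:
--         num = ''
--         for char in part:
--             if char.isdigit():
--                 num += char
--             else:
--                 if num:
--                     current_pos += int(num)
--                     num = ''
--                 # For each mismatch, check if it matches the variant position and ref allele
--                 if current_pos == variant_pos and char == ref_allele:
--                     return True  # Found the variant
--                 current_pos += 1  # Move to next position
--         if num:  # Handle trailing numbers indicating matches
--             current_pos += int(num)
--
--     return False  # Variant not found in this read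
-- ===== SOURCE B (Python) =====
-- def SNV_search(start_pos, md_tag, variant_pos, ref_allele, alt_allele):
--     """Parse the whole MD tag once into a table mapping reference position ->
--     mismatched reference base, then answer the query with a single lookup."""
--     pos = start_pos
--     mismatches = []
--     for part in md_tag.replace('MD:Z:', '').split('^'):
--         num = 0
--         for ch in part:
--             if ch.isdigit():
--                 num = num * 10 + int(ch)
--             else:
--                 pos += num
--                 num = 0
--                 mismatches.append((pos, ch))
--                 pos += 1
--         pos += num
--     table = dict(mismatches)
--     return table.get(variant_pos) == ref_allele
-- ===== Notes on version B (the rewrite author's own statement) =====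
-- stated objective: idiomatic
-- what changed: A scans the MD tag with an inline early-exit state machine that compares each mismatch against the query as it goes; B first parses the whole tag into a mismatch table (reference position -> mismatched base) and then answers with a single table lookup, also accumulating the digit run as an integer instead of a string buffer.
import Mathlib
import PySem

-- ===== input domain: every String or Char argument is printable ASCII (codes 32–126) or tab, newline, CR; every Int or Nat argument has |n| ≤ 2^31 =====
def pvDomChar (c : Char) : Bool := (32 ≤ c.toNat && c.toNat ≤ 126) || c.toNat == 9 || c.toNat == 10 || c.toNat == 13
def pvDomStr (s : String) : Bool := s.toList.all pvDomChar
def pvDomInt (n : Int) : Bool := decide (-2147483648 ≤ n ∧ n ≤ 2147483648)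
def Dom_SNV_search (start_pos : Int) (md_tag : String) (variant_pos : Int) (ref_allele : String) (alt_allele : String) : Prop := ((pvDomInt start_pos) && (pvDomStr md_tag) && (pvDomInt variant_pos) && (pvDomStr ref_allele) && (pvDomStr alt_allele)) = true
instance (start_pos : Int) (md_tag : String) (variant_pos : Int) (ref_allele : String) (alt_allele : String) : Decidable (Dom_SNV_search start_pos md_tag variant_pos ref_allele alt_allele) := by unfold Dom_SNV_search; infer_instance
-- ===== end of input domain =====

-- B replaces A's inline early-exit scan of the MD tag by a parse-once
-- mismatch table (position -> base) followed by a single dictionary lookup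
-- (objective: idiomatic decomposition; same asymptotic cost).

-- ===== PORT A =====

-- int(num) for the strings A passes to it: `num` is always a nonempty run of
-- ASCII digit characters, on which Python's int() is exactly this fold
-- (strip/sign/underscore handling of the general int() is unreachable here).
def pvDigitsVal (cs : List Char) : Int :=
  cs.foldl (fun a c => a * 10 + ((c.toNat : Int) - 48)) 0

-- inner `for char in part` loop; returns `none` for A's early `return True`,
-- `some current_pos` when the part is exhausted (trailing-number flush included)
def pvAInner (variant_pos : Int) (ref_allele : String) :
    List Char → Int → List Char → Option Int
  | [], current_pos, num =>
      some (if num ≠ [] then current_pos + pvDigitsVal num else current_pos)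
  | c :: rest, current_pos, num =>
      if PySem.Chars.isdigit c then
        pvAInner variant_pos ref_allele rest current_pos (num ++ [c])
      else
        let cp := if num ≠ [] then current_pos + pvDigitsVal num else current_pos
        if cp = variant_pos ∧ String.ofList [c] = ref_allele then none
        else pvAInner variant_pos ref_allele rest (cp + 1) []

-- outer `for part in md_parts` loop
def pvAParts (variant_pos : Int) (ref_allele : String) :
    List String → Int → Bool
  | [], _ => false
  | p :: rest, current_pos =>
      match pvAInner variant_pos ref_allele p.toList current_pos [] with
      | none => true
      | some cp' => pvAParts variant_pos ref_allele rest cp'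

def SNV_search (start_pos : Int) (md_tag : String) (variant_pos : Int) (ref_allele : String) (alt_allele : String) : Bool :=
  let md_parts := (PySem.Str.split? (PySem.Str.replace md_tag "MD:Z:" "") "^").getD []
  pvAParts variant_pos ref_allele md_parts start_pos

-- ===== PORT B =====

-- inner `for ch in part` loop of B: accumulates the mismatch list
def pvBCollect : List Char → Int → Int → List (Int × String) → Int × List (Int × String)
  | [], pos, num, acc => (pos + num, acc)
  | c :: rest, pos, num, acc =>
      if PySem.Chars.isdigit c then
        pvBCollect rest pos (num * 10 + ((c.toNat : Int) - 48)) acc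
      else
        pvBCollect rest (pos + num + 1) 0 (acc ++ [(pos + num, String.ofList [c])])

-- outer `for part in …` loop of B
def pvBParts : List String → Int → List (Int × String) → Int × List (Int × String)
  | [], pos, acc => (pos, acc)
  | p :: rest, pos, acc =>
      let r := pvBCollect p.toList pos 0 acc
      pvBParts rest r.1 r.2

def SNV_search_alt (start_pos : Int) (md_tag : String) (variant_pos : Int) (ref_allele : String) (alt_allele : String) : Bool :=
  let parts := (PySem.Str.split? (PySem.Str.replace md_tag "MD:Z:" "") "^").getD []
  let mismatches := (pvBParts parts start_pos []).2
  let table := PySem.Dict.ofList mismatches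
  table.get? variant_pos == some ref_allele

-- ===== PRECONDITION & SPEC =====
def Spec_SNV_search (start_pos : Int) (md_tag : String) (variant_pos : Int) (ref_allele : String) (alt_allele : String) (out : Bool) : Prop := out = SNV_search_alt start_pos md_tag variant_pos ref_allele alt_allele
instance (start_pos : Int) (md_tag : String) (variant_pos : Int) (ref_allele : String) (alt_allele : String) (out : Bool) : Decidable (Spec_SNV_search start_pos md_tag variant_pos ref_allele alt_allele out) := by unfold Spec_SNV_search; infer_instance

-- ===== CLAIM (what is proved, stated in full; the proofs are below) =====
def Claim_equal_SNV_search : Prop := ∀ (start_pos : Int) (md_tag : String) (variant_pos : Int) (ref_allele : String) (alt_allele : String), Dom_SNV_search start_pos md_tag variant_pos ref_allele alt_allele → Spec_SNV_search start_pos md_tag variant_pos ref_allele alt_allele (SNV_search start_pos md_tag variant_pos ref_allele alt_allele)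

-- ===== LEMMAS AND PROOFS =====

-- the accumulators of B's loops are pure appends
theorem pvBCollect_fst (cs : List Char) : ∀ (pos num : Int) (acc : List (Int × String)),
    (pvBCollect cs pos num acc).1 = (pvBCollect cs pos num []).1 := by
  induction cs with
  | nil => intro pos num acc; rfl
  | cons c rest ih =>
      intro pos num acc
      by_cases hd : PySem.Chars.isdigit c = true
      · simp only [pvBCollect, hd, if_true]
        exact ih _ _ _
      · simp only [pvBCollect, hd, Bool.false_eq_true, if_false]
        rw [ih _ _ (acc ++ [(pos + num, String.ofList [c])]),
            ih _ _ ([] ++ [(pos + num, String.ofList [c])])]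

theorem pvBCollect_snd (cs : List Char) : ∀ (pos num : Int) (acc : List (Int × String)),
    (pvBCollect cs pos num acc).2 = acc ++ (pvBCollect cs pos num []).2 := by
  induction cs with
  | nil => intro pos num acc; simp [pvBCollect]
  | cons c rest ih =>
      intro pos num acc
      by_cases hd : PySem.Chars.isdigit c = true
      · simp only [pvBCollect, hd, if_true]
        exact ih _ _ _
      · simp only [pvBCollect, hd, Bool.false_eq_true, if_false]
        rw [ih _ _ (acc ++ [(pos + num, String.ofList [c])]),
            ih _ _ ([] ++ [(pos + num, String.ofList [c])])]
        simp

theorem pvBParts_fst (parts : List String) : ∀ (pos : Int) (acc : List (Int × String)),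
    (pvBParts parts pos acc).1 = (pvBParts parts pos []).1 := by
  induction parts with
  | nil => intro pos acc; rfl
  | cons p rest ih =>
      intro pos acc
      simp only [pvBParts]
      rw [pvBCollect_fst p.toList pos 0 acc,
          ih _ (pvBCollect p.toList pos 0 acc).2,
          ih _ (pvBCollect p.toList pos 0 []).2]

theorem pvBParts_snd (parts : List String) : ∀ (pos : Int) (acc : List (Int × String)),
    (pvBParts parts pos acc).2 = acc ++ (pvBParts parts pos []).2 := by
  induction parts with
  | nil => intro pos acc; simp [pvBParts]
  | cons p rest ih =>
      intro pos acc
      simp only [pvBParts]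
      rw [pvBCollect_fst p.toList pos 0 acc,
          ih _ (pvBCollect p.toList pos 0 acc).2,
          ih _ (pvBCollect p.toList pos 0 []).2,
          pvBCollect_snd p.toList pos 0 acc]
      simp

-- one-step unfoldings of B's inner loop (empty accumulator)
theorem pvBCollect_cons_digit {c : Char} (rest : List Char) (pos num : Int)
    (hd : PySem.Chars.isdigit c = true) :
    pvBCollect (c :: rest) pos num []
      = pvBCollect rest pos (num * 10 + ((c.toNat : Int) - 48)) [] := by
  simp [pvBCollect, hd]

theorem pvBCollect_fst_cons {c : Char} (rest : List Char) (pos num : Int)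
    (hd : ¬ PySem.Chars.isdigit c = true) :
    (pvBCollect (c :: rest) pos num []).1 = (pvBCollect rest (pos + num + 1) 0 []).1 := by
  simp only [pvBCollect, hd, Bool.false_eq_true, if_false]
  rw [pvBCollect_fst]

theorem pvBCollect_snd_cons {c : Char} (rest : List Char) (pos num : Int)
    (hd : ¬ PySem.Chars.isdigit c = true) :
    (pvBCollect (c :: rest) pos num []).2
      = (pos + num, String.ofList [c]) :: (pvBCollect rest (pos + num + 1) 0 []).2 := by
  simp only [pvBCollect, hd, Bool.false_eq_true, if_false]
  rw [pvBCollect_snd]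
  simp

-- one-step unfoldings of B's outer loop (empty accumulator)
theorem pvBParts_fst_cons (p : String) (rest : List String) (pos : Int) :
    (pvBParts (p :: rest) pos []).1
      = (pvBParts rest (pvBCollect p.toList pos 0 []).1 []).1 := by
  simp only [pvBParts]
  rw [pvBParts_fst]

theorem pvBParts_snd_cons (p : String) (rest : List String) (pos : Int) :
    (pvBParts (p :: rest) pos []).2
      = (pvBCollect p.toList pos 0 []).2
        ++ (pvBParts rest (pvBCollect p.toList pos 0 []).1 []).2 := by
  simp only [pvBParts]
  rw [pvBParts_snd]

-- a digit character has code ≥ 48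
theorem pvDigit_code {c : Char} (h : PySem.Chars.isdigit c = true) :
    48 ≤ (c.toNat : Int) := by
  simp only [PySem.Chars.isdigit, Bool.and_eq_true, decide_eq_true_eq] at h
  have h1 : ('0' : Char).toNat ≤ c.toNat := h.1
  have h0 : ('0' : Char).toNat = 48 := rfl
  omega

theorem pvDigitsVal_append (cs : List Char) (c : Char) :
    pvDigitsVal (cs ++ [c]) = pvDigitsVal cs * 10 + ((c.toNat : Int) - 48) := by
  simp [pvDigitsVal]

-- inner loops correspond: A's early exit ↔ the (variant_pos, ref_allele) entry
-- appears in the table segment B builds from the same part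
theorem pvInner_corr (vp : Int) (ra : String) (cs : List Char) :
    ∀ (cur : Int) (numS : List Char) (numI : Int), pvDigitsVal numS = numI →
      (pvAInner vp ra cs cur numS = none → (vp, ra) ∈ (pvBCollect cs cur numI []).2) ∧
      (∀ cur', pvAInner vp ra cs cur numS = some cur' →
        cur' = (pvBCollect cs cur numI []).1 ∧ (vp, ra) ∉ (pvBCollect cs cur numI []).2) := by
  induction cs with
  | nil =>
      intro cur numS numI hrel
      constructor
      · intro h; simp [pvAInner] at h
      · intro cur' h
        simp only [pvAInner, Option.some.injEq] at h
        subst h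
        refine ⟨?_, by simp [pvBCollect]⟩
        by_cases hn : numS = []
        · subst hn; simp [pvDigitsVal] at hrel; simp [pvBCollect, ← hrel]
        · simp [pvBCollect, hn, hrel]
  | cons c rest ih =>
      intro cur numS numI hrel
      by_cases hd : PySem.Chars.isdigit c = true
      · have hrel' : pvDigitsVal (numS ++ [c]) = numI * 10 + ((c.toNat : Int) - 48) := by
          rw [pvDigitsVal_append, hrel]
        have := ih cur (numS ++ [c]) (numI * 10 + ((c.toNat : Int) - 48)) hrel'
        rw [pvBCollect_cons_digit rest cur numI hd]
        simpa [pvAInner, hd] using this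
      · have hcp : (if numS ≠ [] then cur + pvDigitsVal numS else cur) = cur + numI := by
          by_cases hn : numS = []
          · subst hn; simp [pvDigitsVal] at hrel; simp [← hrel]
          · simp [hn, hrel]
        rw [pvBCollect_fst_cons rest cur numI hd, pvBCollect_snd_cons rest cur numI hd]
        by_cases hc : (cur + numI = vp ∧ String.ofList [c] = ra)
        · constructor
          · intro _
            rw [hc.1, hc.2]
            exact List.mem_cons_self
          · intro cur' h
            exfalso
            simp only [pvAInner, hd, Bool.false_eq_true, if_false, hcp, if_pos hc] at h
            simp at h
        · have ihr := ih (cur + numI + 1) [] 0 (by simp [pvDigitsVal])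
          constructor
          · intro h
            simp only [pvAInner, hd, Bool.false_eq_true, if_false, hcp, if_neg hc] at h
            exact List.mem_cons_of_mem _ (ihr.1 h)
          · intro cur' h
            simp only [pvAInner, hd, Bool.false_eq_true, if_false, hcp, if_neg hc] at h
            have hr := ihr.2 cur' h
            refine ⟨hr.1, ?_⟩
            intro hmem
            rcases List.mem_cons.mp hmem with heq | htl
            · apply hc
              have h1 : vp = cur + numI := congrArg Prod.fst heq
              have h2 : ra = String.ofList [c] := congrArg Prod.snd heq
              exact ⟨h1.symm, h2.symm⟩
            · exact hr.2 htl

-- outer loops correspond: A returns True iff the full mismatch table contains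
-- the (variant_pos, ref_allele) entry
theorem pvOuter_corr (vp : Int) (ra : String) (parts : List String) :
    ∀ (cur : Int),
      (pvAParts vp ra parts cur = true ↔ (vp, ra) ∈ (pvBParts parts cur []).2) := by
  induction parts with
  | nil => intro cur; simp [pvAParts, pvBParts]
  | cons p rest ih =>
      intro cur
      rw [show (pvBParts (p :: rest) cur []).2
            = (pvBCollect p.toList cur 0 []).2
              ++ (pvBParts rest (pvBCollect p.toList cur 0 []).1 []).2
          from pvBParts_snd_cons p rest cur]
      have hcorr := pvInner_corr vp ra p.toList cur [] 0 (by simp [pvDigitsVal])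
      cases hA : pvAInner vp ra p.toList cur [] with
      | none =>
          have hm := hcorr.1 hA
          simp only [pvAParts, hA, List.mem_append]
          exact ⟨fun _ => Or.inl hm, fun _ => trivial⟩
      | some cp' =>
          have hs := hcorr.2 cp' hA
          simp only [pvAParts, hA, List.mem_append]
          rw [hs.1, ih]
          constructor
          · exact fun h => Or.inr h
          · rintro (h | h)
            · exact absurd h hs.2
            · exact h

-- keys of the segment B builds are ≥ pos + num, < the final cursor, strictly increasing
theorem pvBCollect_bounds (cs : List Char) : ∀ (pos num : Int), 0 ≤ num →
    (∀ e ∈ (pvBCollect cs pos num []).2,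
        pos + num ≤ e.1 ∧ e.1 < (pvBCollect cs pos num []).1) ∧
    pos + num ≤ (pvBCollect cs pos num []).1 ∧
    List.Pairwise (fun (a b : Int × String) => a.1 < b.1) (pvBCollect cs pos num []).2 := by
  induction cs with
  | nil => intro pos num _; simp [pvBCollect]
  | cons c rest ih =>
      intro pos num hnum
      by_cases hd : PySem.Chars.isdigit c = true
      · have hc := pvDigit_code hd
        have hnum' : 0 ≤ num * 10 + ((c.toNat : Int) - 48) := by omega
        have hrec := ih pos (num * 10 + ((c.toNat : Int) - 48)) hnum'
        rw [pvBCollect_cons_digit rest pos num hd]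
        refine ⟨fun e he => ?_, ?_, hrec.2.2⟩
        · have := hrec.1 e he; omega
        · have := hrec.2.1; omega
      · have hrec := ih (pos + num + 1) 0 le_rfl
        rw [pvBCollect_fst_cons rest pos num hd, pvBCollect_snd_cons rest pos num hd]
        refine ⟨?_, ?_, ?_⟩
        · intro e he
          rcases List.mem_cons.mp he with heq | htl
          · subst heq
            have := hrec.2.1
            exact ⟨le_refl _, by simp only; omega⟩
          · have h1 := hrec.1 e htl
            have := hrec.2.1
            omega
        · have := hrec.2.1; omega
        · refine List.pairwise_cons.mpr ⟨?_, hrec.2.2⟩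
          intro e he
          have h1 := hrec.1 e he
          simp only
          omega

-- keys of the full mismatch table are ≥ pos, < final cursor, strictly increasing
theorem pvBParts_bounds (parts : List String) : ∀ (pos : Int),
    (∀ e ∈ (pvBParts parts pos []).2,
        pos ≤ e.1 ∧ e.1 < (pvBParts parts pos []).1) ∧
    pos ≤ (pvBParts parts pos []).1 ∧
    List.Pairwise (fun (a b : Int × String) => a.1 < b.1) (pvBParts parts pos []).2 := by
  induction parts with
  | nil => intro pos; simp [pvBParts]
  | cons p rest ih =>
      intro pos
      rw [pvBParts_fst_cons p rest pos, pvBParts_snd_cons p rest pos]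
      have h1 := pvBCollect_bounds p.toList pos 0 le_rfl
      have h2 := ih (pvBCollect p.toList pos 0 []).1
      refine ⟨?_, ?_, ?_⟩
      · intro e he
        rcases List.mem_append.mp he with h | h
        · have ha := h1.1 e h
          have hb := h2.2.1
          exact ⟨by omega, by omega⟩
        · have ha := h2.1 e h
          have hb := h1.2.1
          exact ⟨by omega, ha.2⟩
      · have := h1.2.1; have := h2.2.1; omega
      · refine List.pairwise_append.mpr ⟨h1.2.2, h2.2.2, ?_⟩
        intro a ha b hb
        have hA := h1.1 a ha
        have hBq := h2.1 b hb
        omega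

theorem pvKeys_nodup (parts : List String) (pos : Int) :
    ((pvBParts parts pos []).2.map (·.1)).Nodup := by
  have h := (pvBParts_bounds parts pos).2.2
  have hp : List.Pairwise (fun (a b : Int) => a < b) ((pvBParts parts pos []).2.map (·.1)) :=
    (List.pairwise_map).mpr h
  exact hp.imp (fun hab => ne_of_lt hab)

theorem pvItems_ofList (ms : List (Int × String)) (h : (ms.map (·.1)).Nodup) :
    (PySem.Dict.ofList ms).items = ms := by
  have := PySem.Dict.items_foldl_insert_fresh (d := (PySem.Dict.empty : PySem.Dict Int String))
    (l := ms) (k := Prod.fst) (v := Prod.snd) (by simp) h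
  simpa [PySem.Dict.ofList, PySem.Dict.update] using this

theorem pvLookup (ms : List (Int × String)) (h : (ms.map (·.1)).Nodup)
    (vp : Int) (ra : String) :
    ((PySem.Dict.ofList ms).get? vp = some ra) ↔ (vp, ra) ∈ ms := by
  have hk : (PySem.Dict.ofList ms).keys.Nodup := PySem.Dict.nodup_keys_ofList ms
  rw [PySem.Dict.get?_eq_some_iff_mem_items _ _ _ hk, pvItems_ofList ms h]

-- ===== VERDICT (by name: the statement is the Claim_ definition above) =====
theorem SNV_search_spec : Claim_equal_SNV_search := by
  unfold Claim_equal_SNV_search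
  intro start_pos md_tag variant_pos ref_allele alt_allele _
  simp only [Spec_SNV_search, SNV_search, SNV_search_alt]
  have hnd := pvKeys_nodup ((PySem.Str.split? (PySem.Str.replace md_tag "MD:Z:" "") "^").getD []) start_pos
  have hcorr := pvOuter_corr variant_pos ref_allele
    ((PySem.Str.split? (PySem.Str.replace md_tag "MD:Z:" "") "^").getD []) start_pos
  have hlook := pvLookup _ hnd variant_pos ref_allele
  by_cases hm : (variant_pos, ref_allele)
      ∈ (pvBParts ((PySem.Str.split? (PySem.Str.replace md_tag "MD:Z:" "") "^").getD []) start_pos []).2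
  · rw [hcorr.mpr hm, hlook.mpr hm]
    simp
  · have hA : pvAParts variant_pos ref_allele
        ((PySem.Str.split? (PySem.Str.replace md_tag "MD:Z:" "") "^").getD []) start_pos = false := by
      rcases Bool.eq_false_or_eq_true (pvAParts variant_pos ref_allele
        ((PySem.Str.split? (PySem.Str.replace md_tag "MD:Z:" "") "^").getD []) start_pos) with h | h
      · exact absurd (hcorr.mp h) hm
      · exact h
    rw [hA]
    cases hq : (PySem.Dict.ofList (pvBParts
        ((PySem.Str.split? (PySem.Str.replace md_tag "MD:Z:" "") "^").getD []) start_pos []).2).get? variant_pos with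
    | none => simp
    | some v =>
        have hv : v ≠ ref_allele := fun he => hm (hlook.mp (by rw [hq, he]))
        simp [hv]
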